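-- pv_equiv track=rewrite | github.com/YutoMizutani/TranslateAuthors | ReadConfigFile.py | __translate_ignore_before_blanks
-- ===== SOURCE A (Python) =====
-- def __translate_ignore_before_blanks(text):
--     # e.g. '   a bc' -> 'a bc'
--     is_not_blank_find_yet = True
--     result = ''
--     for char in text:
--         if is_not_blank_find_yet:
--             if char != ' ':
--                 is_not_blank_find_yet = False
--         if not is_not_blank_find_yet:
--             result += char
--     return result
-- ===== SOURCE B (Python) =====
-- def __translate_ignore_before_blanks(text):
--     # e.g. '   a bc' -> 'a bc'
--     i = 0
--     while i < len(text) and text[i] == ' ':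
--         i += 1
--     return text[i:]
-- ===== Notes on version B (the rewrite author's own statement) =====
-- stated objective: faster
-- what changed: Replaced the boolean-flag loop that appends characters one by one with an integer index scanning past leading spaces followed by a single tail slice.
import Mathlib
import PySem

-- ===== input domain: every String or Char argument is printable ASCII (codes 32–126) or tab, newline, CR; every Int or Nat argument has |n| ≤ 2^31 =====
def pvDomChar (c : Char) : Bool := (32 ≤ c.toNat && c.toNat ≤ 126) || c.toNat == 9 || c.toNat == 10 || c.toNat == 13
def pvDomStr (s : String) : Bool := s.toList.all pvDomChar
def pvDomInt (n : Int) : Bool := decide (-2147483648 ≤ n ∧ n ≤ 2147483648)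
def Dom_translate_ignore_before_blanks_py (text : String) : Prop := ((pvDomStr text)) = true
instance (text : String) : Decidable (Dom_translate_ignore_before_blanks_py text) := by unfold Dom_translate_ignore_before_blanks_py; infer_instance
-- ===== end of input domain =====

-- B replaces A's boolean flag + char-by-char accumulation with an index scan past
-- leading spaces and one tail slice (objective: simpler).

-- ===== PORT A =====
-- A's for-loop: state (is_not_blank_find_yet, result); result accumulated char by char.
def pvALoop : List Char → Bool → List Char → List Char
  | [], _, res => res
  | c :: cs, flag, res =>
    let flag' := if flag then (if c ≠ ' ' then false else flag) else flag
    let res' := if ¬ flag' then res ++ [c] else res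
    pvALoop cs flag' res'

def translate_ignore_before_blanks_py (text : String) : String :=
  String.mk (pvALoop text.toList true [])

-- ===== PORT B =====
-- B's while-loop: i increments while text[i] == ' '; structural recursion on the chars.
def pvBIdx : List Char → Nat
  | [] => 0
  | c :: cs => if c = ' ' then pvBIdx cs + 1 else 0

-- text[i:] with 0 ≤ i ≤ len(text) is exactly List.drop i.
def translate_ignore_before_blanks_py_alt (text : String) : String :=
  String.mk (text.toList.drop (pvBIdx text.toList))

-- ===== PRECONDITION & SPEC =====
def Spec_translate_ignore_before_blanks_py (text : String) (out : String) : Prop := out = translate_ignore_before_blanks_py_alt text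
instance (text : String) (out : String) : Decidable (Spec_translate_ignore_before_blanks_py text out) := by unfold Spec_translate_ignore_before_blanks_py; infer_instance

-- ===== CLAIM (what is proved, stated in full; the proofs are below) =====
def Claim_equal_translate_ignore_before_blanks_py : Prop := ∀ (text : String), Dom_translate_ignore_before_blanks_py text → Spec_translate_ignore_before_blanks_py text (translate_ignore_before_blanks_py text)

-- ===== LEMMAS AND PROOFS =====
-- Once the flag is false, A just appends the rest of the input.
theorem pvALoop_false (cs : List Char) : ∀ res, pvALoop cs false res = res ++ cs := by
  induction cs with
  | nil => intro res; simp [pvALoop]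
  | cons c cs ih => intro res; simp [pvALoop, ih]

-- With the flag still true and empty accumulator, A's result is the tail past the leading spaces.
theorem pvALoop_true (cs : List Char) : pvALoop cs true [] = cs.drop (pvBIdx cs) := by
  induction cs with
  | nil => simp [pvALoop, pvBIdx]
  | cons c cs ih =>
    by_cases h : c = ' '
    · simp [pvALoop, pvBIdx, h, ih]
    · simp [pvALoop, pvBIdx, h, pvALoop_false]

-- ===== VERDICT (by name: the statement is the Claim_ definition above) =====
theorem translate_ignore_before_blanks_py_spec : Claim_equal_translate_ignore_before_blanks_py := by
  intro text _
  unfold Spec_translate_ignore_before_blanks_py translate_ignore_before_blanks_py translate_ignore_before_blanks_py_alt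
  rw [pvALoop_true]
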